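-- pv_equiv track=rewrite | github.com/alextra-lab/personal_agent | src/personal_agent/request_gateway/delegation.py | compose_delegation_instructions
-- ===== SOURCE A (Python) =====
-- from collections.abc import Sequence
--
-- def compose_delegation_instructions(
--     task_description: str,
--     context_notes: Sequence[str] | None = None,
--     conventions: Sequence[str] | None = None,
--     acceptance_criteria: Sequence[str] | None = None,
--     known_pitfalls: Sequence[str] | None = None,
-- ) -> str:
--     """Compose a markdown delegation instruction package.
--
--     Args:
--         task_description: What the external agent should do.
--         context_notes: Relevant context about the codebase/project.
--         conventions: Coding conventions to follow.
--         acceptance_criteria: How to verify the work is done.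
--         known_pitfalls: Lessons from past delegations.
--
--     Returns:
--         Formatted markdown string ready for copy-paste.
--     """
--     sections: list[str] = []
--
--     sections.append(f"# Delegation Instruction Package\n\n## Task\n\n{task_description}")
--
--     if context_notes:
--         items = "\n".join(f"- {note}" for note in context_notes)
--         sections.append(f"## Context\n\n{items}")
--
--     if conventions:
--         items = "\n".join(f"- {conv}" for conv in conventions)
--         sections.append(f"## Conventions\n\n{items}")
--
--     if acceptance_criteria:
--         items = "\n".join(f"- [ ] {criterion}" for criterion in acceptance_criteria)
--         sections.append(f"## Acceptance Criteria\n\n{items}")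
--
--     if known_pitfalls:
--         items = "\n".join(f"- {pitfall}" for pitfall in known_pitfalls)
--         sections.append(f"## Known Pitfalls (from memory)\n\n{items}")
--
--     return "\n\n".join(sections) + "\n"
-- ===== SOURCE B (Python) =====
-- def compose_delegation_instructions(
--     task_description,
--     context_notes=None,
--     conventions=None,
--     acceptance_criteria=None,
--     known_pitfalls=None,
-- ):
--     """Emit the document directly: no sections list, no outer join — the Task header
--     plus a recursively built suffix, each present section contributing
--     '\\n\\n<header>\\n\\n<bullets>' where bullets = prefix + ('\\n'+prefix).join(items)."""
--
--     def rest(specs):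
--         if not specs:
--             return "\n"
--         (header, prefix, data), tail = specs[0], specs[1:]
--         tailstr = rest(tail)
--         if data:
--             body = prefix + ("\n" + prefix).join(data)
--             return "\n\n" + header + "\n\n" + body + tailstr
--         return tailstr
--
--     return (
--         "# Delegation Instruction Package\n\n## Task\n\n" + task_description
--         + rest([
--             ("## Context", "- ", context_notes),
--             ("## Conventions", "- ", conventions),
--             ("## Acceptance Criteria", "- [ ] ", acceptance_criteria),
--             ("## Known Pitfalls (from memory)", "- ", known_pitfalls),
--         ])
--     )
-- ===== Notes on version B (the rewrite author's own statement) =====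
-- stated objective: alternative
-- what changed: Instead of accumulating a list of section strings and joining it with blank-line separators at the end, B emits the markdown directly: a recursion over a (header, prefix, items) spec table builds the suffix string back-to-front, each present section contributing its separator-prefixed block, and each bullet body is built by joining the raw items with newline-plus-prefix as the separator rather than mapping the prefix onto every item before joining.
import Mathlib
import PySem

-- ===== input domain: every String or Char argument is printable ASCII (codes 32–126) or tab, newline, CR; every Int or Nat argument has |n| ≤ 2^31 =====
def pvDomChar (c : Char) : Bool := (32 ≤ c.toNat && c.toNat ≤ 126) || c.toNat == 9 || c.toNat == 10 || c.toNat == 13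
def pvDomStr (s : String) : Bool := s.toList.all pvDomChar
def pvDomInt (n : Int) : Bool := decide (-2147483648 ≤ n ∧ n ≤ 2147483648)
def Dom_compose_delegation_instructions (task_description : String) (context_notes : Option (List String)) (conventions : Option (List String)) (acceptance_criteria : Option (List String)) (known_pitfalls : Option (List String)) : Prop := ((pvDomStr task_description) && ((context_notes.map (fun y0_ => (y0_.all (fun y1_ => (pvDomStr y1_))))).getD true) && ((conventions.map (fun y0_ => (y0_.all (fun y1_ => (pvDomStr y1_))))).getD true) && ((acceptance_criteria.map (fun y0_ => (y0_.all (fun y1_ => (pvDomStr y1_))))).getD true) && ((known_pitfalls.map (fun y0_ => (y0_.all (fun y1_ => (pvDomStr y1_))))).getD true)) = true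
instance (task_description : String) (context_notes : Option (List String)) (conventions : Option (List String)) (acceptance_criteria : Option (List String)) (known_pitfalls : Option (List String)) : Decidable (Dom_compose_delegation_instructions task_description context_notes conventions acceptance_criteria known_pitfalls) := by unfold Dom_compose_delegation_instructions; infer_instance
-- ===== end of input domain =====

-- B emits the document directly by recursion over a spec table (no sections list, no outer join); objective: simpler.

-- ===== PORT A =====
-- A: builds a list of section strings, appending each guarded section, then joins with "\n\n" and adds "\n".
def compose_delegation_instructions (task_description : String) (context_notes : Option (List String)) (conventions : Option (List String)) (acceptance_criteria : Option (List String)) (known_pitfalls : Option (List String)) : String :=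
  let sections : List String := ["# Delegation Instruction Package\n\n## Task\n\n" ++ task_description]
  let sections := match context_notes with
    | some l => if l ≠ [] then sections ++ ["## Context\n\n" ++ PySem.Str.join "\n" (l.map (fun note => "- " ++ note))] else sections
    | none => sections
  let sections := match conventions with
    | some l => if l ≠ [] then sections ++ ["## Conventions\n\n" ++ PySem.Str.join "\n" (l.map (fun conv => "- " ++ conv))] else sections
    | none => sections
  let sections := match acceptance_criteria with
    | some l => if l ≠ [] then sections ++ ["## Acceptance Criteria\n\n" ++ PySem.Str.join "\n" (l.map (fun criterion => "- [ ] " ++ criterion))] else sections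
    | none => sections
  let sections := match known_pitfalls with
    | some l => if l ≠ [] then sections ++ ["## Known Pitfalls (from memory)\n\n" ++ PySem.Str.join "\n" (l.map (fun pitfall => "- " ++ pitfall))] else sections
    | none => sections
  PySem.Str.join "\n\n" sections ++ "\n"

-- ===== PORT B =====
-- B's helper `rest`: recursion over the spec table, emitting "\n\n<header>\n\n<bullets>" per present
-- section directly onto the suffix; base case supplies the trailing newline.
def pvRestSections : List (String × String × Option (List String)) → String
  | [] => "\n"
  | (header, pre, data) :: tail =>
    let tailstr := pvRestSections tail
    match data with
    | some l => if l ≠ [] then "\n\n" ++ header ++ "\n\n" ++ (pre ++ PySem.Str.join ("\n" ++ pre) l) ++ tailstr else tailstr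
    | none => tailstr

def compose_delegation_instructions_alt (task_description : String) (context_notes : Option (List String)) (conventions : Option (List String)) (acceptance_criteria : Option (List String)) (known_pitfalls : Option (List String)) : String :=
  "# Delegation Instruction Package\n\n## Task\n\n" ++ task_description ++
    pvRestSections
      [("## Context", "- ", context_notes),
       ("## Conventions", "- ", conventions),
       ("## Acceptance Criteria", "- [ ] ", acceptance_criteria),
       ("## Known Pitfalls (from memory)", "- ", known_pitfalls)]

-- ===== PRECONDITION & SPEC =====
def Spec_compose_delegation_instructions (task_description : String) (context_notes : Option (List String)) (conventions : Option (List String)) (acceptance_criteria : Option (List String)) (known_pitfalls : Option (List String)) (out : String) : Prop := out = compose_delegation_instructions_alt task_description context_notes conventions acceptance_criteria known_pitfalls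
instance (task_description : String) (context_notes : Option (List String)) (conventions : Option (List String)) (acceptance_criteria : Option (List String)) (known_pitfalls : Option (List String)) (out : String) : Decidable (Spec_compose_delegation_instructions task_description context_notes conventions acceptance_criteria known_pitfalls out) := by unfold Spec_compose_delegation_instructions; infer_instance

-- ===== CLAIM (what is proved, stated in full; the proofs are below) =====
def Claim_equal_compose_delegation_instructions : Prop := ∀ (task_description : String) (context_notes : Option (List String)) (conventions : Option (List String)) (acceptance_criteria : Option (List String)) (known_pitfalls : Option (List String)), Dom_compose_delegation_instructions task_description context_notes conventions acceptance_criteria known_pitfalls → Spec_compose_delegation_instructions task_description context_notes conventions acceptance_criteria known_pitfalls (compose_delegation_instructions task_description context_notes conventions acceptance_criteria known_pitfalls)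

-- ===== LEMMAS AND PROOFS =====
theorem pvJoin_singleton (sep a : String) : PySem.Str.join sep [a] = a := by
  apply String.toList_injective
  rw [PySem.Str.toList_join]
  simp [PySem.Chars.join_singleton]

theorem pvJoin_cons_cons (sep a b : String) (t : List String) :
    PySem.Str.join sep (a :: b :: t) = a ++ sep ++ PySem.Str.join sep (b :: t) := by
  apply String.toList_injective
  simp [PySem.Str.toList_join, PySem.Chars.join_cons_cons]

-- bullets: "\n".join(prefix + item …) = prefix + ("\n"+prefix).join(items) for nonempty items
theorem pvBullets (p x : String) (t : List String) :
    PySem.Str.join "\n" ((x :: t).map (fun s => p ++ s)) = p ++ PySem.Str.join ("\n" ++ p) (x :: t) := by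
  induction t generalizing x with
  | nil => simp [pvJoin_singleton]
  | cons y t ih =>
    simp only [List.map_cons] at *
    rw [pvJoin_cons_cons, pvJoin_cons_cons, ih y]
    simp [String.append_assoc]

-- the list of section strings A appends for a given spec table
def pvSecsOf : List (String × String × Option (List String)) → List String
  | [] => []
  | (header, pre, data) :: tail =>
    (match data with
     | some l => if l ≠ [] then [header ++ "\n\n" ++ PySem.Str.join "\n" (l.map (fun s => pre ++ s))] else []
     | none => []) ++ pvSecsOf tail

-- core: A's join-over-sections equals B's direct recursive emission
theorem pvKey (s0 : String) (specs : List (String × String × Option (List String))) :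
    PySem.Str.join "\n\n" (s0 :: pvSecsOf specs) ++ "\n" = s0 ++ pvRestSections specs := by
  induction specs generalizing s0 with
  | nil => simp [pvSecsOf, pvRestSections, pvJoin_singleton]
  | cons sp tail ih =>
    obtain ⟨header, pre, data⟩ := sp
    match data with
    | none => simpa [pvSecsOf, pvRestSections] using ih s0
    | some l =>
      match l with
      | [] => simpa [pvSecsOf, pvRestSections] using ih s0
      | x :: xs =>
        simp only [pvSecsOf, pvRestSections, if_pos (List.cons_ne_nil x xs), List.singleton_append]
        rw [pvJoin_cons_cons, String.append_assoc, String.append_assoc, ih, ← pvBullets]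
        simp [String.append_assoc]

-- ===== VERDICT (by name: the statement is the Claim_ definition above) =====
theorem compose_delegation_instructions_spec : Claim_equal_compose_delegation_instructions := by
  intro td cn co ac kp _
  unfold Spec_compose_delegation_instructions compose_delegation_instructions compose_delegation_instructions_alt
  rw [← pvKey]
  cases cn <;> cases co <;> cases ac <;> cases kp <;>
    simp only [pvSecsOf] <;> (try split_ifs) <;> simp
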